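-- pv_equiv track=rewrite | github.com/webvalley/wv-mongo-docker | plic_pipeline_gui/plic_pipeline_gui/utils.py | mv_lab_to_ult_tsa
-- ===== SOURCE A (Python) =====
-- def mv_lab_to_ult_tsa(new_cols_names):
--     fixed_new_cols_names = []
--     do_replace = False
--     for col in new_cols_names:
--         if col.startswith("lab:imt") and not do_replace:
--             do_replace = True
--         if do_replace and ":" in col and col.startswith("lab:"):
--             col = "ult_tsa:%s" % col.split(":")[1]
--         fixed_new_cols_names.append(col)
--     return fixed_new_cols_names
-- ===== SOURCE B (Python) =====
-- def mv_lab_to_ult_tsa(new_cols_names):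
--     t = next((i for i, c in enumerate(new_cols_names) if c.startswith("lab:imt")), None)
--     if t is None:
--         return list(new_cols_names)
--     return [
--         "ult_tsa:" + col.split(":")[1] if i >= t and col.startswith("lab:") else col
--         for i, col in enumerate(new_cols_names)
--     ]
-- ===== Notes on version B (the rewrite author's own statement) =====
-- stated objective: simpler
-- what changed: replaces A's running one-way boolean flag threaded through an accumulating loop by an explicit search for the index of the first 'lab:imt' column followed by a threshold-indexed map (copy unchanged if no trigger)
import Mathlib
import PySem

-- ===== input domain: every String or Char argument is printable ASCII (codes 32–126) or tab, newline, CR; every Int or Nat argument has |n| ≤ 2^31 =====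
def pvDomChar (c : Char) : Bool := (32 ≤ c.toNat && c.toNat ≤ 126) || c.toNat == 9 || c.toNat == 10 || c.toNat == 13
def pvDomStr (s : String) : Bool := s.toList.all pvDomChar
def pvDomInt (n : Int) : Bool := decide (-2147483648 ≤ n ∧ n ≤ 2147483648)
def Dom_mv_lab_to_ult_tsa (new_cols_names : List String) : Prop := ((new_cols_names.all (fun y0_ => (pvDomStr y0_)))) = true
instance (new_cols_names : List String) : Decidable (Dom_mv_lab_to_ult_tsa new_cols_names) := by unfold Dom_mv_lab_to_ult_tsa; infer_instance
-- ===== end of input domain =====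

-- B replaces A's running one-way flag by "find the first 'lab:imt' column, then rewrite every
-- 'lab:'-column at or after that index" — a simpler search-then-map decomposition, same cost.

-- "ult_tsa:%s" % col.split(":")[1]  /  "ult_tsa:" + col.split(":")[1]  (same expression in both Pythons)
def pvRenB (col : String) : String :=
  "ult_tsa:" ++ PySem.List.pyGetD ((PySem.Str.split? col ":").getD []) 1 ""

-- ===== PORT A =====
def pvStepA (st : List String × Bool) (col : String) : List String × Bool :=
  let do_replace := if PySem.Str.startswith col "lab:imt" && !st.2 then true else st.2
  let col' := if do_replace && PySem.Str.isIn ":" col && PySem.Str.startswith col "lab:" then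
      pvRenB col
    else col
  (st.1 ++ [col'], do_replace)

def mv_lab_to_ult_tsa (new_cols_names : List String) : List String :=
  (new_cols_names.foldl pvStepA ([], false)).1

-- ===== PORT B =====
def mv_lab_to_ult_tsa_alt (new_cols_names : List String) : List String :=
  match ((PySem.List.enumerate new_cols_names 0).find?
      (fun p => PySem.Str.startswith p.2 "lab:imt")).map (·.1) with
  | none => new_cols_names
  | some t =>
    (PySem.List.enumerate new_cols_names 0).map (fun p =>
      if decide (t ≤ p.1) && PySem.Str.startswith p.2 "lab:" then pvRenB p.2 else p.2)

-- ===== PRECONDITION & SPEC =====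
def Spec_mv_lab_to_ult_tsa (new_cols_names : List String) (out : List String) : Prop := out = mv_lab_to_ult_tsa_alt new_cols_names
instance (new_cols_names : List String) (out : List String) : Decidable (Spec_mv_lab_to_ult_tsa new_cols_names out) := by unfold Spec_mv_lab_to_ult_tsa; infer_instance

-- ===== CLAIM (what is proved, stated in full; the proofs are below) =====
def Claim_equal_mv_lab_to_ult_tsa : Prop := ∀ (new_cols_names : List String), Dom_mv_lab_to_ult_tsa new_cols_names → Spec_mv_lab_to_ult_tsa new_cols_names (mv_lab_to_ult_tsa new_cols_names)

-- ===== LEMMAS AND PROOFS =====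

-- the per-column rewrite once the trigger has been seen
def pvRew (col : String) : String :=
  if PySem.Str.startswith col "lab:" then pvRenB col else col

-- B's algorithm started at index s (pvAltFrom ncs 0 = mv_lab_to_ult_tsa_alt ncs, by rfl)
def pvAltFrom (xs : List String) (s : Int) : List String :=
  match ((PySem.List.enumerate xs s).find?
      (fun p => PySem.Str.startswith p.2 "lab:imt")).map (·.1) with
  | none => xs
  | some t =>
    (PySem.List.enumerate xs s).map (fun p =>
      if decide (t ≤ p.1) && PySem.Str.startswith p.2 "lab:" then pvRenB p.2 else p.2)

theorem pvAltFrom_zero (xs : List String) : pvAltFrom xs 0 = mv_lab_to_ult_tsa_alt xs := rfl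

theorem pv_sw_imt_lab (col : String)
    (h : PySem.Chars.startswith col.toList ['l', 'a', 'b', ':', 'i', 'm', 't'] = true) :
    PySem.Chars.startswith col.toList ['l', 'a', 'b', ':'] = true := by
  rw [PySem.Chars.startswith_iff] at h ⊢
  exact List.IsPrefix.trans (by decide) h

theorem pv_sw_lab_colon (col : String)
    (h : PySem.Chars.startswith col.toList ['l', 'a', 'b', ':'] = true) :
    PySem.Chars.isIn [':'] col.toList = true := by
  rw [PySem.Chars.isIn_iff_infix]
  rw [PySem.Chars.startswith_iff] at h
  exact List.IsInfix.trans (by decide) h.isInfix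

theorem pv_stepA_true (acc : List String) (col : String) :
    pvStepA (acc, true) col = (acc ++ [pvRew col], true) := by
  simp only [pvStepA, pvRew]
  by_cases h : PySem.Chars.startswith col.toList ['l', 'a', 'b', ':'] = true
  · have hc := pv_sw_lab_colon col h
    simp [h, hc]
  · simp [h]

theorem pv_foldA_true (xs : List String) :
    ∀ acc : List String, xs.foldl pvStepA (acc, true) = (acc ++ xs.map pvRew, true) := by
  induction xs with
  | nil => intro acc; simp
  | cons x xs ih =>
    intro acc
    rw [List.foldl_cons, pv_stepA_true, ih]
    simp

theorem pv_map_threshold (xs : List String) :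
    ∀ (s t : Int), t ≤ s →
      (PySem.List.enumerate xs s).map (fun p =>
          if decide (t ≤ p.1) && PySem.Str.startswith p.2 "lab:" then pvRenB p.2 else p.2)
        = xs.map pvRew := by
  induction xs with
  | nil => intro s t _; simp [PySem.List.enumerate_nil]
  | cons x xs ih =>
    intro s t hts
    rw [PySem.List.enumerate_cons, List.map_cons, ih (s + 1) t (by omega)]
    have hd : decide (t ≤ s) = true := by simpa using hts
    simp only [hd, Bool.true_and, pvRew, List.map_cons]

theorem pv_find_ge (xs : List String) (s t : Int)
    (h : ((PySem.List.enumerate xs s).find?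
        (fun p => PySem.Str.startswith p.2 "lab:imt")).map (·.1) = some t) :
    s ≤ t := by
  rcases Option.map_eq_some_iff.mp h with ⟨p, hp, hpt⟩
  have hmem := List.mem_of_find?_eq_some hp
  rcases (PySem.List.mem_enumerate_iff _ _ _).mp hmem with ⟨k, hk, rfl⟩
  subst hpt
  simp only []
  omega

theorem pv_main (xs : List String) :
    ∀ (acc : List String) (s : Int),
      (xs.foldl pvStepA (acc, false)).1 = acc ++ pvAltFrom xs s := by
  induction xs with
  | nil => intro acc s; simp [pvAltFrom, PySem.List.enumerate_nil]
  | cons x xs ih =>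
    intro acc s
    by_cases h : PySem.Chars.startswith x.toList ['l', 'a', 'b', ':', 'i', 'm', 't'] = true
    · -- the trigger column: the flag turns on and x itself is rewritten
      have hlab := pv_sw_imt_lab x h
      have hcol := pv_sw_lab_colon x hlab
      have hstep : pvStepA (acc, false) x = (acc ++ [pvRew x], true) := by
        simp only [pvStepA, pvRew]
        simp [h, hlab, hcol]
      have halt : pvAltFrom (x :: xs) s = pvRew x :: xs.map pvRew := by
        unfold pvAltFrom
        rw [PySem.List.enumerate_cons]
        rw [List.find?_cons_of_pos (by simpa using h)]
        simp only [Option.map_some, List.map_cons]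
        rw [pv_map_threshold xs (s + 1) s (by omega)]
        simp [pvRew, hlab]
      rw [List.foldl_cons, hstep, pv_foldA_true, halt]
      simp
    · -- before any trigger: x is kept and the search continues at s + 1
      have hstep : pvStepA (acc, false) x = (acc ++ [x], false) := by
        simp only [pvStepA]
        simp [h]
      have halt : pvAltFrom (x :: xs) s = x :: pvAltFrom xs (s + 1) := by
        unfold pvAltFrom
        rw [PySem.List.enumerate_cons]
        rw [List.find?_cons_of_neg (by simpa using h)]
        cases hfind : ((PySem.List.enumerate xs (s + 1)).find?
            (fun p => PySem.Str.startswith p.2 "lab:imt")).map (·.1) with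
        | none => rfl
        | some t =>
          have hge : s + 1 ≤ t := pv_find_ge xs (s + 1) t hfind
          have hts : decide (t ≤ s) = false := by simp; omega
          simp only [List.map_cons, hts, Bool.false_and, Bool.false_eq_true, if_neg,
            not_false_eq_true]
      rw [List.foldl_cons, hstep, ih (acc ++ [x]) (s + 1), halt]
      simp

-- ===== VERDICT (by name: the statement is the Claim_ definition above) =====
theorem mv_lab_to_ult_tsa_spec : Claim_equal_mv_lab_to_ult_tsa := by
  intro ncs _
  unfold Spec_mv_lab_to_ult_tsa mv_lab_to_ult_tsa
  rw [pv_main ncs [] 0, pvAltFrom_zero]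
  simp
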